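-- pv_equiv track=rewrite | github.com/eduardo-de-bastiani/Recursion-Algorithm | saltos.py | non_recursive
-- ===== SOURCE A (Python) =====
-- def non_recursive(path):
--     n = len(path)
--     # Edge case: If the path is too short or only contains "m" and "0"s
--     if n == 0 or path[0] != 'm' or path[-1] != 'm':
--         return 0
--     # Initialize the dp array with 0's
--     # dp[i][j] represents ways to reach position i, where j is 0 if last jump wasn't 3, 1 if it was
--     dp = [[0, 0] for _ in range(n)]
--     dp[0][0] = 1  # There's one way to start from the first "m"
--
--     # Loop through each position and calculate ways to reach it
--     for i in range(1, n):
--         if path[i] == '0':  # Skip if the current position is a gap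
--             continue
--         # Check 1-meter back
--         if i - 1 >= 0:
--             dp[i][0] += dp[i-1][0] + dp[i-1][1]
--         # Check 2-meters back
--         if i - 2 >= 0:
--             dp[i][0] += dp[i-2][0] + dp[i-2][1]
--         # Check 3-meters back
--         if i - 3 >= 0:
--             dp[i][1] += dp[i-3][0]  # Only if last jump wasn't 3 meters
--
--     # The result will be the sum of ways to reach the last position (the final 'm')
--     return dp[-1][0] + dp[-1][1]
-- ===== SOURCE B (Python) =====
-- def non_recursive(path):
--     n = len(path)
--     # Edge case: path too short or doesn't start/end on a stone
--     if n == 0 or path[0] != 'm' or path[-1] != 'm':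
--         return 0
--     memo = {}
--
--     def ways(i, was3):
--         # number of ways to reach position i, where was3 says the jump into i was 3m
--         if i < 0:
--             return 0
--         if path[i] == '0':
--             return 0
--         if i == 0:
--             return 0 if was3 else 1
--         key = (i, was3)
--         if key not in memo:
--             if was3:
--                 memo[key] = ways(i - 3, False)
--             else:
--                 memo[key] = (ways(i - 1, False) + ways(i - 1, True)
--                              + ways(i - 2, False) + ways(i - 2, True))
--         return memo[key]
--
--     return ways(n - 1, False) + ways(n - 1, True)
-- ===== Notes on version B (the rewrite author's own statement) =====
-- stated objective: alternative
-- what changed: Replaced A's bottom-up dp table of (ways, ways-by-3-jump) pairs with a top-down memoized recursion over (position, came-by-3-jump), keeping the same edge guard.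
import Mathlib
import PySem

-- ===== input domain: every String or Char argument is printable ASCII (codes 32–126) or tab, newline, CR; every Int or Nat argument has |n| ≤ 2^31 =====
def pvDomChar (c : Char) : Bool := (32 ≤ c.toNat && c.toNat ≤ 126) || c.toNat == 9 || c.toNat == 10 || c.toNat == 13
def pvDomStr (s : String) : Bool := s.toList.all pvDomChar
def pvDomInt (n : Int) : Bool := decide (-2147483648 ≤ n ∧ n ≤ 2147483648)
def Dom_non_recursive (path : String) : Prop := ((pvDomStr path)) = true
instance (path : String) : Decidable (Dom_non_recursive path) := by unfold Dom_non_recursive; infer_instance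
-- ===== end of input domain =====

-- B replaces A's bottom-up two-column dp table by a top-down recursion on (position, came-by-3-jump) — same cost, different decomposition.

-- ===== PORT A =====
def nrUpd1 (dp : List (Int × Int)) (i : Int) : List (Int × Int) :=
  if 0 ≤ i - 1 then
    let v := dp.getD (i - 1).toNat (0, 0)
    let c := dp.getD i.toNat (0, 0)
    dp.set i.toNat (c.1 + (v.1 + v.2), c.2)
  else dp

def nrUpd2 (dp : List (Int × Int)) (i : Int) : List (Int × Int) :=
  if 0 ≤ i - 2 then
    let v := dp.getD (i - 2).toNat (0, 0)
    let c := dp.getD i.toNat (0, 0)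
    dp.set i.toNat (c.1 + (v.1 + v.2), c.2)
  else dp

def nrUpd3 (dp : List (Int × Int)) (i : Int) : List (Int × Int) :=
  if 0 ≤ i - 3 then
    let v := dp.getD (i - 3).toNat (0, 0)
    let c := dp.getD i.toNat (0, 0)
    dp.set i.toNat (c.1, c.2 + v.1)
  else dp

def nrStep (path : String) (dp : List (Int × Int)) (i : Int) : List (Int × Int) :=
  if PySem.Str.pyGet? path i = some '0' then dp
  else nrUpd3 (nrUpd2 (nrUpd1 dp i) i) i

def non_recursive (path : String) : Int :=
  let n : Int := PySem.Str.len path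
  if n = 0 ∨ PySem.Str.pyGet? path 0 ≠ some 'm' ∨ PySem.Str.pyGet? path (-1) ≠ some 'm' then 0
  else
    let dp : List (Int × Int) := List.replicate n.toNat (0, 0)
    let dp := dp.set 0 (1, 0)
    let dp := (PySem.List.pyRange 1 n 1).foldl (nrStep path) dp
    let last := PySem.List.pyGetD dp (-1) (0, 0)
    last.1 + last.2

-- ===== PORT B =====
def altWaysF (path : String) : Nat → Int → Bool → Int
  | 0, _, _ => 0
  | f + 1, i, was3 =>
    if i < 0 then 0
    else if PySem.Str.pyGet? path i = some '0' then 0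
    else if i = 0 then (if was3 then 0 else 1)
    else if was3 then altWaysF path f (i - 3) false
    else altWaysF path f (i - 1) false + altWaysF path f (i - 1) true
         + altWaysF path f (i - 2) false + altWaysF path f (i - 2) true

def altWays (path : String) (i : Int) (was3 : Bool) : Int :=
  altWaysF path (i.toNat + 1) i was3

def non_recursive_alt (path : String) : Int :=
  let n : Int := PySem.Str.len path
  if n = 0 ∨ PySem.Str.pyGet? path 0 ≠ some 'm' ∨ PySem.Str.pyGet? path (-1) ≠ some 'm' then 0
  else altWays path (n - 1) false + altWays path (n - 1) true

-- ===== PRECONDITION & SPEC =====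
def Spec_non_recursive (path : String) (out : Int) : Prop := out = non_recursive_alt path
instance (path : String) (out : Int) : Decidable (Spec_non_recursive path out) := by unfold Spec_non_recursive; infer_instance

-- ===== CLAIM (what is proved, stated in full; the proofs are below) =====
def Claim_equal_non_recursive : Prop := ∀ (path : String), Dom_non_recursive path → Spec_non_recursive path (non_recursive path)

-- ===== LEMMAS AND PROOFS =====


-- proof-side helpers
def nrW (path : String) (j : Nat) : Int × Int := (altWays path j false, altWays path j true)

def nrInv (path : String) (n k : Nat) (dp : List (Int × Int)) : Prop :=
  dp.length = n ∧ ∀ j : Nat, j < n → dp.getD j (0, 0) = if j ≤ k then nrW path j else (0, 0)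

theorem nrGetD_set_self (l : List (Int × Int)) (i : Nat) (v d : Int × Int) (h : i < l.length) :
    (l.set i v).getD i d = v := by
  simp [List.getD_eq_getElem?_getD, h]

theorem nrGetD_set_ne (l : List (Int × Int)) (i j : Nat) (v d : Int × Int) (h : i ≠ j) :
    (l.set i v).getD j d = l.getD j d := by
  simp [List.getD_eq_getElem?_getD, List.getElem?_set_ne, h]

theorem altWaysF_congr (path : String) :
    ∀ (f g : Nat) (i : Int) (b : Bool), i.toNat < f → i.toNat < g →
      altWaysF path f i b = altWaysF path g i b := by
  intro f
  induction f with
  | zero => intro g i b hf hg; omega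
  | succ f ih =>
    intro g i b hf hg
    cases g with
    | zero => omega
    | succ g =>
      by_cases h1 : i < 0
      · simp only [altWaysF, if_pos h1]
      · by_cases hz : PySem.Str.pyGet? path i = some '0'
        · simp only [altWaysF, if_neg h1, if_pos hz]
        · by_cases h2 : i = 0
          · simp only [altWaysF, if_neg h1, if_neg hz, if_pos h2]
          · cases b
            · simp only [altWaysF, if_neg h1, if_neg hz, if_neg h2, Bool.false_eq_true,
                if_false]
              rw [ih g (i - 1) false (by omega) (by omega),
                ih g (i - 1) true (by omega) (by omega),
                ih g (i - 2) false (by omega) (by omega),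
                ih g (i - 2) true (by omega) (by omega)]
            · simp only [altWaysF, if_neg h1, if_neg hz, if_neg h2, if_true]
              rw [ih g (i - 3) false (by omega) (by omega)]

theorem altWaysF_eq_altWays (path : String) (f : Nat) (i : Int) (b : Bool)
    (hf : i.toNat < f) : altWaysF path f i b = altWays path i b := by
  rw [altWays]
  exact altWaysF_congr path f (i.toNat + 1) i b hf (by omega)

theorem altWays_neg (path : String) (i : Int) (b : Bool) (h : i < 0) : altWays path i b = 0 := by
  rw [altWays]
  have : i.toNat + 1 = 0 + 1 := by omega
  rw [this]
  simp [altWaysF, h]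

theorem altWays_zero_f (path : String) (h : PySem.Str.pyGet? path 0 ≠ some '0') :
    altWays path 0 false = 1 := by
  rw [altWays]
  show (if (0 : Int) < 0 then (0 : Int)
    else if PySem.Str.pyGet? path 0 = some '0' then 0
    else if (0 : Int) = 0 then (if false then 0 else 1)
    else _) = 1
  rw [if_neg (by omega : ¬ ((0 : Int) < 0)), if_neg h, if_pos rfl]
  simp

theorem altWays_zero_t (path : String) (h : PySem.Str.pyGet? path 0 ≠ some '0') :
    altWays path 0 true = 0 := by
  rw [altWays]
  show (if (0 : Int) < 0 then (0 : Int)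
    else if PySem.Str.pyGet? path 0 = some '0' then 0
    else if (0 : Int) = 0 then (if true then 0 else 1)
    else _) = 0
  rw [if_neg (by omega : ¬ ((0 : Int) < 0)), if_neg h, if_pos rfl]
  simp

theorem altWays_unfold_succ (path : String) (k : Nat) (b : Bool) :
    altWays path ((k : Int) + 1) b = altWaysF path (k + 2) ((k : Int) + 1) b := by
  rw [altWays]
  have : ((k : Int) + 1).toNat + 1 = k + 2 := by omega
  rw [this]

theorem altWays_succ_f (path : String) (k : Nat)
    (hz : ¬ PySem.Str.pyGet? path ((k : Int) + 1) = some '0') :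
    altWays path ((k : Int) + 1) false =
      altWays path (k : Int) false + altWays path (k : Int) true
        + altWays path ((k : Int) - 1) false + altWays path ((k : Int) - 1) true := by
  rw [altWays_unfold_succ]
  show (if (k : Int) + 1 < 0 then (0 : Int)
    else if PySem.Str.pyGet? path ((k : Int) + 1) = some '0' then 0
    else if (k : Int) + 1 = 0 then (if false then 0 else 1)
    else if false then altWaysF path (k + 1) ((k : Int) + 1 - 3) false
    else altWaysF path (k + 1) ((k : Int) + 1 - 1) false
      + altWaysF path (k + 1) ((k : Int) + 1 - 1) true
      + altWaysF path (k + 1) ((k : Int) + 1 - 2) false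
      + altWaysF path (k + 1) ((k : Int) + 1 - 2) true) = _
  rw [if_neg (by omega : ¬ ((k : Int) + 1 < 0)), if_neg hz,
    if_neg (by omega : ¬ ((k : Int) + 1 = 0)), if_neg (by simp)]
  have e1 : (k : Int) + 1 - 1 = (k : Int) := by ring
  have e2 : (k : Int) + 1 - 2 = (k : Int) - 1 := by ring
  rw [e1, e2]
  rw [altWaysF_eq_altWays path _ _ _ (by omega), altWaysF_eq_altWays path _ _ _ (by omega),
    altWaysF_eq_altWays path _ _ _ (by omega), altWaysF_eq_altWays path _ _ _ (by omega)]

theorem altWays_succ_t (path : String) (k : Nat)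
    (hz : ¬ PySem.Str.pyGet? path ((k : Int) + 1) = some '0') :
    altWays path ((k : Int) + 1) true = altWays path ((k : Int) - 2) false := by
  rw [altWays_unfold_succ]
  show (if (k : Int) + 1 < 0 then (0 : Int)
    else if PySem.Str.pyGet? path ((k : Int) + 1) = some '0' then 0
    else if (k : Int) + 1 = 0 then (if true then 0 else 1)
    else if true then altWaysF path (k + 1) ((k : Int) + 1 - 3) false
    else altWaysF path (k + 1) ((k : Int) + 1 - 1) false
      + altWaysF path (k + 1) ((k : Int) + 1 - 1) true
      + altWaysF path (k + 1) ((k : Int) + 1 - 2) false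
      + altWaysF path (k + 1) ((k : Int) + 1 - 2) true) = _
  rw [if_neg (by omega : ¬ ((k : Int) + 1 < 0)), if_neg hz,
    if_neg (by omega : ¬ ((k : Int) + 1 = 0)), if_pos rfl]
  have e3 : (k : Int) + 1 - 3 = (k : Int) - 2 := by ring
  rw [e3]
  rw [altWaysF_eq_altWays path _ _ _ (by omega)]

theorem altWays_zero_gap (path : String) (k : Nat)
    (hz : PySem.Str.pyGet? path ((k : Int) + 1) = some '0') (b : Bool) :
    altWays path ((k : Int) + 1) b = 0 := by
  rw [altWays_unfold_succ]
  show (if (k : Int) + 1 < 0 then (0 : Int)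
    else if PySem.Str.pyGet? path ((k : Int) + 1) = some '0' then 0
    else _) = 0
  rw [if_neg (by omega : ¬ ((k : Int) + 1 < 0)), if_pos hz]

theorem nrInv_base (path : String) (n : Nat) (_hn1 : 1 ≤ n)
    (h0 : PySem.Str.pyGet? path 0 ≠ some '0') :
    nrInv path n 0 ((List.replicate n ((0 : Int), (0 : Int))).set 0 (1, 0)) := by
  refine ⟨by simp, ?_⟩
  intro j hj
  by_cases hj0 : j = 0
  · subst hj0
    rw [nrGetD_set_self _ _ _ _ (by simp; omega)]
    simp [nrW, altWays_zero_f path h0, altWays_zero_t path h0]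
  · rw [nrGetD_set_ne _ _ _ _ _ (fun h => hj0 h.symm)]
    rw [if_neg (by omega)]
    simp [List.getD_eq_getElem?_getD, hj]

theorem nrUpd1_closed (dp : List (Int × Int)) (k : Nat) (w : Int × Int)
    (hvk : dp.getD k (0, 0) = w) (hcur : dp.getD (k + 1) (0, 0) = (0, 0)) :
    nrUpd1 dp ((k : Int) + 1) = dp.set (k + 1) (w.1 + w.2, 0) := by
  rw [nrUpd1, if_pos (by omega : (0 : Int) ≤ (k : Int) + 1 - 1)]
  have e0 : ((k : Int) + 1).toNat = k + 1 := by omega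
  have e1 : ((k : Int) + 1 - 1).toNat = k := by omega
  simp only [e0, e1, hvk, hcur]
  norm_num

theorem nrUpd2_closed (dp : List (Int × Int)) (k : Nat) (h1k : 1 ≤ k) (w c : Int × Int)
    (hv : dp.getD (k - 1) (0, 0) = w) (hc : dp.getD (k + 1) (0, 0) = c) :
    nrUpd2 dp ((k : Int) + 1) = dp.set (k + 1) (c.1 + (w.1 + w.2), c.2) := by
  rw [nrUpd2, if_pos (by omega : (0 : Int) ≤ (k : Int) + 1 - 2)]
  have e0 : ((k : Int) + 1).toNat = k + 1 := by omega
  have e2 : ((k : Int) + 1 - 2).toNat = k - 1 := by omega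
  simp only [e0, e2, hv, hc]

theorem nrUpd2_skip (dp : List (Int × Int)) (k : Nat) (h1k : ¬ 1 ≤ k) :
    nrUpd2 dp ((k : Int) + 1) = dp := by
  rw [nrUpd2, if_neg (by omega : ¬ (0 : Int) ≤ (k : Int) + 1 - 2)]

theorem nrUpd3_closed (dp : List (Int × Int)) (k : Nat) (h2k : 2 ≤ k) (w c : Int × Int)
    (hv : dp.getD (k - 2) (0, 0) = w) (hc : dp.getD (k + 1) (0, 0) = c) :
    nrUpd3 dp ((k : Int) + 1) = dp.set (k + 1) (c.1, c.2 + w.1) := by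
  rw [nrUpd3, if_pos (by omega : (0 : Int) ≤ (k : Int) + 1 - 3)]
  have e0 : ((k : Int) + 1).toNat = k + 1 := by omega
  have e3 : ((k : Int) + 1 - 3).toNat = k - 2 := by omega
  simp only [e0, e3, hv, hc]

theorem nrUpd3_skip (dp : List (Int × Int)) (k : Nat) (h2k : ¬ 2 ≤ k) :
    nrUpd3 dp ((k : Int) + 1) = dp := by
  rw [nrUpd3, if_neg (by omega : ¬ (0 : Int) ≤ (k : Int) + 1 - 3)]

theorem nrStep_closed (path : String) (n k : Nat) (dp : List (Int × Int))
    (hk : k + 1 < n) (hlen : dp.length = n)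
    (hget : ∀ j : Nat, j < n → dp.getD j (0, 0) = if j ≤ k then nrW path j else (0, 0))
    (hz : ¬ PySem.Str.pyGet? path ((k : Int) + 1) = some '0') :
    nrStep path dp ((k : Int) + 1) =
      dp.set (k + 1)
        ((nrW path k).1 + (nrW path k).2
            + (if 1 ≤ k then (nrW path (k - 1)).1 + (nrW path (k - 1)).2 else 0),
          if 2 ≤ k then (nrW path (k - 2)).1 else 0) := by
  have hkn : k + 1 < dp.length := by omega
  have hcur : dp.getD (k + 1) (0, 0) = (0, 0) := by
    rw [hget (k + 1) hk, if_neg (by omega)]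
  have hvk : dp.getD k (0, 0) = nrW path k := by
    rw [hget k (by omega), if_pos (by omega)]
  rw [nrStep, if_neg hz, nrUpd1_closed dp k (nrW path k) hvk hcur]
  by_cases h1k : 1 ≤ k
  · rw [nrUpd2_closed _ k h1k (nrW path (k - 1)) ((nrW path k).1 + (nrW path k).2, 0)
      (by rw [nrGetD_set_ne _ _ _ _ _ (by omega), hget (k - 1) (by omega), if_pos (by omega)])
      (nrGetD_set_self _ _ _ _ (by simpa using hkn))]
    rw [List.set_set]
    by_cases h2k : 2 ≤ k
    · rw [nrUpd3_closed _ k h2k (nrW path (k - 2))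
        ((nrW path k).1 + (nrW path k).2 + ((nrW path (k - 1)).1 + (nrW path (k - 1)).2), 0)
        (by rw [nrGetD_set_ne _ _ _ _ _ (by omega), hget (k - 2) (by omega), if_pos (by omega)])
        (nrGetD_set_self _ _ _ _ (by simpa using hkn))]
      rw [List.set_set]
      simp [h1k, h2k]
    · rw [nrUpd3_skip _ k h2k]
      simp [h1k, h2k]
  · rw [nrUpd2_skip _ k h1k, nrUpd3_skip _ k (by omega)]
    have h2k : ¬ 2 ≤ k := by omega
    simp [h1k, h2k]

theorem nrEntry_eq (path : String) (k : Nat)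
    (hz : ¬ PySem.Str.pyGet? path ((k : Int) + 1) = some '0') :
    ((nrW path k).1 + (nrW path k).2
        + (if 1 ≤ k then (nrW path (k - 1)).1 + (nrW path (k - 1)).2 else 0),
      if 2 ≤ k then (nrW path (k - 2)).1 else 0) = nrW path (k + 1) := by
  have hc : ((k + 1 : Nat) : Int) = (k : Int) + 1 := by push_cast; ring
  simp only [nrW, hc, altWays_succ_f path k hz, altWays_succ_t path k hz]
  rw [Prod.mk.injEq]
  constructor
  · by_cases h1k : 1 ≤ k
    · have e : (((k - 1 : Nat)) : Int) = (k : Int) - 1 := by omega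
      rw [if_pos h1k, e]; ring
    · rw [if_neg h1k, altWays_neg path ((k : Int) - 1) false (by omega),
        altWays_neg path ((k : Int) - 1) true (by omega)]
      ring
  · by_cases h2k : 2 ≤ k
    · have e : (((k - 2 : Nat)) : Int) = (k : Int) - 2 := by omega
      rw [if_pos h2k, e]
    · rw [if_neg h2k, altWays_neg path ((k : Int) - 2) false (by omega)]

theorem nrInv_step (path : String) (n k : Nat) (dp : List (Int × Int)) (hk : k + 1 < n)
    (h : nrInv path n k dp) : nrInv path n (k + 1) (nrStep path dp ((k : Int) + 1)) := by
  obtain ⟨hlen, hget⟩ := h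
  by_cases hz : PySem.Str.pyGet? path ((k : Int) + 1) = some '0'
  · rw [nrStep, if_pos hz]
    refine ⟨hlen, ?_⟩
    intro j hj
    rw [hget j hj]
    by_cases hjk : j ≤ k
    · rw [if_pos hjk, if_pos (by omega)]
    · by_cases hje : j = k + 1
      · subst hje
        rw [if_neg hjk, if_pos (by omega)]
        have hc : ((k + 1 : Nat) : Int) = (k : Int) + 1 := by push_cast; ring
        simp only [nrW, hc, altWays_zero_gap path k hz]
      · rw [if_neg hjk, if_neg (by omega)]
  · rw [nrStep_closed path n k dp hk hlen hget hz, nrEntry_eq path k hz]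
    refine ⟨by simp [hlen], ?_⟩
    intro j hj
    by_cases hje : j = k + 1
    · subst hje
      rw [nrGetD_set_self _ _ _ _ (by omega), if_pos (by omega)]
    · rw [nrGetD_set_ne _ _ _ _ _ (fun h => hje h.symm), hget j hj]
      by_cases hjk : j ≤ k
      · rw [if_pos hjk, if_pos (by omega)]
      · rw [if_neg hjk, if_neg (by omega)]

theorem nrInv_fold (path : String) (n : Nat) (hn1 : 1 ≤ n)
    (h0 : PySem.Str.pyGet? path 0 ≠ some '0') :
    ∀ k : Nat, k < n →
      nrInv path n k ((PySem.List.pyRange 1 ((k : Int) + 1) 1).foldl (nrStep path)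
        ((List.replicate n ((0 : Int), (0 : Int))).set 0 (1, 0))) := by
  intro k
  induction k with
  | zero =>
    intro _
    rw [PySem.List.pyRange_one_eq_nil (by omega)]
    exact nrInv_base path n hn1 h0
  | succ k ih =>
    intro hk
    have hc : ((k + 1 : Nat) : Int) + 1 = ((k : Int) + 1) + 1 := by push_cast; ring
    rw [hc, PySem.List.pyRange_one_succ_right (by omega), List.foldl_append]
    simp only [List.foldl_cons, List.foldl_nil]
    exact nrInv_step path n k _ hk (ih (by omega))

-- ===== VERDICT (by name: the statement is the Claim_ definition above) =====
theorem non_recursive_spec : Claim_equal_non_recursive := by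
  intro path _
  unfold Spec_non_recursive non_recursive non_recursive_alt
  by_cases hg : PySem.Str.len path = 0 ∨ PySem.Str.pyGet? path 0 ≠ some 'm' ∨
      PySem.Str.pyGet? path (-1) ≠ some 'm'
  · rw [if_pos hg, if_pos hg]
  · rw [if_neg hg, if_neg hg]
    push_neg at hg
    obtain ⟨hL, h0, _⟩ := hg
    have hlen : PySem.Str.len path = (path.toList.length : Int) := by
      simp [PySem.Str.len_eq]
    have hL1 : 1 ≤ path.toList.length := by
      rw [hlen] at hL; omega
    have h0' : PySem.Str.pyGet? path 0 ≠ some '0' := by rw [h0]; simp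
    have hfold := nrInv_fold path path.toList.length hL1 h0' (path.toList.length - 1)
      (by omega)
    have hc : ((path.toList.length - 1 : Nat) : Int) + 1 = (path.toList.length : Int) := by
      rw [Nat.cast_sub hL1]; ring
    rw [hc] at hfold
    obtain ⟨hflen, hfget⟩ := hfold
    rw [hlen]
    simp only [Int.toNat_natCast]
    have hne : (PySem.List.pyRange 1 (path.toList.length : Int) 1).foldl (nrStep path)
        ((List.replicate path.toList.length ((0 : Int), (0 : Int))).set 0 (1, 0)) ≠ [] := by
      apply List.ne_nil_of_length_pos
      rw [hflen]; omega
    rw [PySem.List.pyGetD_neg_one _ _ hne]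
    have hlast : ((PySem.List.pyRange 1 (path.toList.length : Int) 1).foldl (nrStep path)
        ((List.replicate path.toList.length ((0 : Int), (0 : Int))).set 0 (1, 0))).getLast
        hne = nrW path (path.toList.length - 1) := by
      rw [List.getLast_eq_getElem]
      have hval := hfget (path.toList.length - 1) (by omega)
      rw [if_pos (le_refl _)] at hval
      rw [List.getD_eq_getElem _ _ (by rw [hflen]; omega)] at hval
      simp only [hflen]
      exact hval
    rw [hlast]
    have hc2 : (path.toList.length : Int) - 1 = ((path.toList.length - 1 : Nat) : Int) := by
      rw [Nat.cast_sub hL1]; norm_num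
    rw [hc2]
    rfl
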